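-- pv_equiv track=rewrite | github.com/ShaneDrury/pyontdd | pyontdd/lib/statistics.py | jackknife
-- ===== SOURCE A (Python) =====
-- def jackknife(sample, n=1):
--     length = len(sample)
--     lists = []
--     selectevery = int(length/n)
--     for j in range(selectevery):
--         this_list=[]
--         for i in range(length):
--             if i % selectevery != j:
--                 this_list.append(sample[i])
--         lists.append(this_list)  # Copy to eventual output
--     return lists
-- ===== SOURCE B (Python) =====
-- def jackknife(sample, n=1):
--     length = len(sample)
--     selectevery = int(length/n)
--     if selectevery <= 0:
--         return []
--     # chunk the sample into consecutive blocks of size selectevery; resample j is the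
--     # concatenation of every block with its j-th element deleted by slicing
--     blocks = [sample[k:k + selectevery] for k in range(0, length, selectevery)]
--     return [[x for b in blocks for x in b[:j] + b[j + 1:]] for j in range(selectevery)]
-- ===== Notes on version B (the rewrite author's own statement) =====
-- stated objective: alternative
-- what changed: B replaces A's per-resample modulo scans over the whole sample by chunking the sample once into consecutive blocks of size selectevery and building each resample as the concatenation of every block with its j-th element deleted by slicing (no modulo test).
import Mathlib
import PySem

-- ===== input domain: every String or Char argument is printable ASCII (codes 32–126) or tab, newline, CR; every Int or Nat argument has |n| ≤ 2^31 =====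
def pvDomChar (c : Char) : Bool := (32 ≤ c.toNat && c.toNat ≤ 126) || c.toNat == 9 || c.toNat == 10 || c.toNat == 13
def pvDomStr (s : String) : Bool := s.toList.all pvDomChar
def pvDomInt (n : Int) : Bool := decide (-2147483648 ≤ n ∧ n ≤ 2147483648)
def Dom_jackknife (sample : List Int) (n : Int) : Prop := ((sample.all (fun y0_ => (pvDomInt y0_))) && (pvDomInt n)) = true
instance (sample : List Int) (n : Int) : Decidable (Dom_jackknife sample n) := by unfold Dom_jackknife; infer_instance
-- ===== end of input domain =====

-- B replaces A's per-resample modulo scans by chunking the sample into blocks of size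
-- selectevery and building each resample by slicing the j-th element out of every block
-- (alternative algorithm of the same cost).


-- ===== PORT A =====
-- selectevery = int(length/n): for length ≥ 0 Python's truncating int(length/n) and Lean's `/`
-- agree whenever the value is ≥ 0, and both are ≤ 0 otherwise (then .toNat gives an empty range,
-- exactly like Python's range of a non-positive bound); n = 0 (ZeroDivisionError) is outside Pre_.
def jackknife (sample : List Int) (n : Int) : List (List Int) :=
  let length := sample.length
  let selectevery := (((length : Int)) / n).toNat
  (List.range selectevery).foldl
    (fun lists j =>
      lists ++ [(List.range length).foldl
        (fun this_list i =>
          if i % selectevery ≠ j then this_list ++ [sample.getD i 0] else this_list)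
        []])
    []

-- ===== PORT B =====
-- Source B's slices carry non-negative bounds only: sample[k:k+se] is PySem.List.slice with
-- nat-cast bounds, b[:j] / b[j+1:] likewise; range(0, length, se) is pyRange with step se.
def jackknife_alt (sample : List Int) (n : Int) : List (List Int) :=
  let length := sample.length
  let selecteveryI : Int := ((length : Int)) / n
  if selecteveryI ≤ 0 then []
  else
    let se := selecteveryI.toNat
    let blocks := (PySem.List.pyRange 0 (length : Int) (se : Int)).map
      (fun k => PySem.List.slice sample (some k) (some (k + (se : Int))))
    (List.range se).map (fun (j : Nat) =>
      blocks.flatMap (fun b =>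
        PySem.List.slice b none (some ((j : Int))) ++
        PySem.List.slice b (some ((j : Int) + 1)) none))

-- ===== PRECONDITION & SPEC =====
-- Pre_ excludes only n = 0, on which Python A raises ZeroDivisionError.
def Pre_jackknife (sample : List Int) (n : Int) : Prop := n ≠ 0
instance (sample : List Int) (n : Int) : Decidable (Pre_jackknife sample n) := by unfold Pre_jackknife; infer_instance
def pvWitness_jackknife : List Int × Int := ([1, 2, 3, 4, 5, 6], 2)

def Spec_jackknife (sample : List Int) (n : Int) (out : List (List Int)) : Prop := out = jackknife_alt sample n
instance (sample : List Int) (n : Int) (out : List (List Int)) : Decidable (Spec_jackknife sample n out) := by unfold Spec_jackknife; infer_instance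

-- ===== CLAIM (what is proved, stated in full; the proofs are below) =====
def Claim_equal_jackknife : Prop := ∀ (sample : List Int) (n : Int), Dom_jackknife sample n → Pre_jackknife sample n → Spec_jackknife sample n (jackknife sample n)

-- ===== LEMMAS AND PROOFS =====

-- closed form of one resample row: elements of xs (carrying absolute index starting at k)
-- whose index is not ≡ j modulo se
def pvRow (se : Nat) (j : Nat) : List Int → Nat → List Int
  | [], _ => []
  | x :: xs, k => (if k % se ≠ j then [x] else []) ++ pvRow se j xs (k + 1)

theorem pvRow_append (se j : Nat) (a : List Int) : ∀ (b : List Int) (k : Nat),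
    pvRow se j (a ++ b) k = pvRow se j a k ++ pvRow se j b (k + a.length) := by
  induction a with
  | nil => intro b k; simp [pvRow]
  | cons x xs ih =>
    intro b k
    simp only [List.cons_append, pvRow, ih, List.length_cons, List.append_assoc]
    rw [show k + 1 + xs.length = k + (xs.length + 1) from by omega]

theorem pvRow_mod (se j : Nat) : ∀ (xs : List Int) (k k' : Nat), k % se = k' % se →
    pvRow se j xs k = pvRow se j xs k' := by
  intro xs
  induction xs with
  | nil => intro k k' _; rfl
  | cons x xs ih =>
    intro k k' h
    have h1 : (k + 1) % se = (k' + 1) % se := by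
      rw [Nat.add_mod, Nat.add_mod k' 1, h]
    simp only [pvRow, h, ih (k + 1) (k' + 1) h1]

-- a block that fits below se (absolute indices k, …, k+|b|-1 < se): pvRow deletes exactly
-- the element at absolute position j
theorem pvRow_small (se j : Nat) : ∀ (b : List Int) (k : Nat), k + b.length ≤ se →
    pvRow se j b k = b.take (j - k) ++ b.drop (j + 1 - k) := by
  intro b
  induction b with
  | nil => intro k _; simp [pvRow]
  | cons x xs ih =>
    intro k hk
    have hkse : k < se := by simp at hk; omega
    have hmod : k % se = k := Nat.mod_eq_of_lt hkse
    have ih' := ih (k + 1) (by simp at hk ⊢; omega)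
    by_cases hkj : k = j
    · subst hkj
      simp only [pvRow, hmod, ne_eq, not_true_eq_false, if_false, List.nil_append, ih']
      simp
    · simp only [pvRow, hmod, ne_eq, hkj, not_false_eq_true, if_true, ih']
      by_cases hlt : k < j
      · have h1 : j - k = (j - (k + 1)) + 1 := by omega
        have h2 : j + 1 - k = (j + 1 - (k + 1)) + 1 := by omega
        simp [h1, h2]
      · have h1 : j - k = 0 := by omega
        have h2 : j + 1 - k = 0 := by omega
        have h3 : j - (k + 1) = 0 := by omega
        have h4 : j + 1 - (k + 1) = 0 := by omega
        simp [h1, h2, h3, h4]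

-- B's chunked rows: the first N blocks of xs, each with position j sliced out,
-- concatenate to pvRow of the first N*se elements
theorem pv_chunks (se j : Nat) : ∀ (N : Nat) (xs : List Int),
    ((List.range N).map (fun m => (xs.drop (m * se)).take se)).flatMap
        (fun b => b.take j ++ b.drop (j + 1))
      = pvRow se j (xs.take (N * se)) 0 := by
  intro N
  induction N with
  | zero => intro xs; simp [pvRow]
  | succ N ih =>
    intro xs
    rw [List.range_succ_eq_map]
    simp only [List.map_cons, List.map_map, List.flatMap_cons, Nat.zero_mul, List.drop_zero]
    have hcomp : ((fun m => (xs.drop (m * se)).take se) ∘ (fun i => i + 1))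
        = fun m => ((xs.drop se).drop (m * se)).take se := by
      funext m
      simp [Function.comp, List.drop_drop, Nat.succ_mul, Nat.add_comm]
    rw [hcomp, ih (xs.drop se)]
    have hsplit : xs.take ((N + 1) * se) = xs.take se ++ (xs.drop se).take (N * se) := by
      rw [← List.take_add]
      congr 1
      ring
    rw [hsplit, pvRow_append]
    have hfirst : (xs.take se).take j ++ (xs.take se).drop (j + 1)
        = pvRow se j (xs.take se) 0 := by
      rw [pvRow_small se j (xs.take se) 0 (by simp)]
      simp
    rw [hfirst]
    by_cases h : se ≤ xs.length
    · have hlen : (xs.take se).length = se := by simp [h]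
      rw [hlen]
      congr 1
      apply pvRow_mod
      simp [Nat.mod_self]
    · have hx : (xs.drop se).take (N * se) = [] := by
        simp [List.drop_eq_nil_of_le (le_of_lt (Nat.lt_of_not_le h))]
      simp [hx, pvRow]

-- A's inner fold computes pvRow
theorem pvA_row (se j : Nat) (sample : List Int) :
    ∀ (ys : List Int) (k : Nat) (acc : List Int), sample.drop k = ys →
    (List.range' k ys.length).foldl
      (fun this_list i =>
        if i % se ≠ j then this_list ++ [sample.getD i 0] else this_list)
      acc
    = acc ++ pvRow se j ys k := by
  intro ys
  induction ys with
  | nil => intro k acc _; simp [pvRow]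
  | cons y ys ih =>
    intro k acc hdrop
    have hk : sample.getD k 0 = y := by
      have h0 : (sample.drop k)[0]? = some y := by rw [hdrop]; rfl
      rw [List.getElem?_drop] at h0
      simp only [Nat.add_zero] at h0
      simp [List.getD, h0]
    have hdrop' : sample.drop (k + 1) = ys := by
      have h1 : sample.drop (k + 1) = (sample.drop k).drop 1 := by
        rw [List.drop_drop]
      rw [h1, hdrop]; rfl
    simp only [List.length_cons, List.range'_succ, List.foldl_cons, hk]
    rw [ih (k + 1) _ hdrop']
    by_cases h : k % se ≠ j
    · simp [pvRow, h]
    · simp [pvRow, h]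

-- the number of blocks covers the whole sample
theorem pv_nb_covers (len se : Nat) (hse : 0 < se) :
    len ≤ ((len + se - 1) / se) * se := by
  rw [Nat.mul_comm]
  have h2 : (len + se - 1) % se < se := Nat.mod_lt _ hse
  have h1 := Nat.div_add_mod (len + se - 1) se
  generalize (len + se - 1) / se = q at h1 ⊢
  generalize se * q = Q at h1 ⊢
  omega

-- the two algorithms agree for every value of selectevery
theorem pv_core (sample : List Int) (seI : Int) :
    (List.range seI.toNat).foldl
      (fun lists j =>
        lists ++ [(List.range sample.length).foldl
          (fun this_list i =>
            if i % seI.toNat ≠ j then this_list ++ [sample.getD i 0] else this_list)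
          []])
      []
    = (if seI ≤ 0 then [] else
        (List.range seI.toNat).map (fun (j : Nat) =>
          ((PySem.List.pyRange 0 ((sample.length : Int)) ((seI.toNat : Int))).map
            (fun k => PySem.List.slice sample (some k) (some (k + ((seI.toNat : Int)))))).flatMap
            (fun b =>
              PySem.List.slice b none (some ((j : Int))) ++
              PySem.List.slice b (some ((j : Int) + 1)) none))) := by
  by_cases hpos : seI ≤ 0
  · rw [if_pos hpos, Int.toNat_of_nonpos hpos]
    simp
  · rw [if_neg hpos]
    rw [Int.not_le] at hpos
    set se := seI.toNat with hse
    have hse0 : 0 < se := by omega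
    rw [PySem.List.foldl_append_singleton_eq_map]
    rw [List.nil_append]
    apply List.map_congr_left
    intro j hj
    have hA : (List.range sample.length).foldl
        (fun this_list i => if i % se ≠ j then this_list ++ [sample.getD i 0] else this_list) []
        = pvRow se j sample 0 := by
      have h := pvA_row se j sample sample 0 [] (by simp)
      simpa [List.range_eq_range'] using h
    rw [hA]
    rw [PySem.List.pyRange_of_pos 0 ((sample.length : Int)) (by exact_mod_cast hse0)]
    set nb := (if (0 : Int) < (sample.length : Int)
        then ((((sample.length : Int)) - 0 + (se : Int) - 1) / (se : Int)).toNat else 0) with hnb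
    have hblocks : ((List.range nb).map (fun (k : Nat) => (0 : Int) + (se : Int) * (k : Int))).map
        (fun k => PySem.List.slice sample (some k) (some (k + (se : Int))))
        = (List.range nb).map (fun m => (sample.drop (m * se)).take se) := by
      rw [List.map_map]
      apply List.map_congr_left
      intro m _
      simp only [Function.comp, zero_add]
      have hcast : ((se : Int)) * (m : Int) = ((m * se : Nat) : Int) := by push_cast; ring
      rw [hcast, ← Nat.cast_add, PySem.List.slice_natCast]
      simp
    rw [hblocks]
    have hslice : (fun b : List Int =>
        PySem.List.slice b none (some ((j : Int))) ++ PySem.List.slice b (some ((j : Int) + 1)) none)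
        = fun b : List Int => b.take j ++ b.drop (j + 1) := by
      funext b
      rw [PySem.List.slice_to_natCast]
      rw [show ((j : Int) + 1) = (((j + 1 : Nat)) : Int) from by push_cast; ring]
      rw [PySem.List.slice_from_natCast]
    rw [hslice, pv_chunks se j nb sample]
    have hcover : sample.take (nb * se) = sample := by
      apply List.take_of_length_le
      by_cases hL0 : 0 < sample.length
      · have hnbv : nb = (sample.length + se - 1) / se := by
          rw [hnb, if_pos (by exact_mod_cast hL0)]
          rw [show ((sample.length : Int)) - 0 + (se : Int) - 1
              = (((sample.length + se - 1 : Nat)) : Int) from by omega]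
          rw [← Int.natCast_div]
          exact Int.toNat_natCast _
        rw [hnbv]
        exact pv_nb_covers sample.length se hse0
      · simp [show sample.length = 0 from by omega]
    rw [hcover]

theorem pv_both (sample : List Int) (n : Int) :
    jackknife sample n = jackknife_alt sample n := by
  unfold jackknife jackknife_alt
  exact pv_core sample (((sample.length : Int)) / n)

-- ===== VERDICT (by name: the statement is the Claim_ definition above) =====
theorem jackknife_spec : Claim_equal_jackknife := by
  intro sample n _ _
  exact pv_both sample n
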